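-- pv_equiv track=rewrite | github.com/radjivrand/aoc2018 | 12a_v2.py | count_pots
-- ===== SOURCE A (Python) =====
-- def count_pots(input_string, shifter):
--     inp_list = list(input_string)
--     counter = 0
--     pot_sum = 0
--     for pot in inp_list:
--         counter += 1
--         if pot == "#":
--             pot_sum += counter + shifter
--             # print (counter)
--     return pot_sum
-- ===== SOURCE B (Python) =====
-- def count_pots(input_string, shifter):
--     # Segment on '#': the k-th '#' sits right after the first k+1 segments' chars,
--     # so its 1-based position is (prefix-sum of segment lengths) + k + 1.
--     parts = input_string.split('#')
--     m = len(parts) - 1          # number of '#' characters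
--     prefix = 0
--     total = 0
--     for part in parts[:-1]:
--         prefix += len(part)
--         total += prefix
--     return total + m * (m - 1) // 2 + m * (1 + shifter)
-- ===== Notes on version B (the rewrite author's own statement) =====
-- stated objective: faster
-- what changed: B splits the string on '#' into segments and reconstructs the answer from prefix sums of segment lengths plus a closed-form arithmetic series and a single m*(1+shifter) term, instead of A's per-character counter/accumulator scan; the character scan moves into C-level str.split, leaving a loop only over the m segments.
import Mathlib
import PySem

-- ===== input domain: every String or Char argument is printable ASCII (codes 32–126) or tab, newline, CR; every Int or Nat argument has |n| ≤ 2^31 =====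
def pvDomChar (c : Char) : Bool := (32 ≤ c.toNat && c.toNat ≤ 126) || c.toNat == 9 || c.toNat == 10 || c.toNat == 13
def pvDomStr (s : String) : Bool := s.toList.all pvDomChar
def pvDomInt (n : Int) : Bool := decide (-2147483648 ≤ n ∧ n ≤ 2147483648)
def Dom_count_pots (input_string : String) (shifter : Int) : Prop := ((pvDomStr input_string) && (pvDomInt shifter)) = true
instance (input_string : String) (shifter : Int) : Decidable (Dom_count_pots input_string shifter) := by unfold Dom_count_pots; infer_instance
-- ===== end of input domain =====

-- B splits the string on '#' and rebuilds hit positions from prefix sums of segment lengths, adding the arithmetic series and shifter term in closed form; measured constant-factor speedup (scan moves into str.split).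


-- ===== PORT A =====
-- literal transliteration: counter and pot_sum folded together over the characters
def count_pots (input_string : String) (shifter : Int) : Int :=
  let inp_list := input_string.toList
  (inp_list.foldl (fun (st : Int × Int) pot =>
      let counter := st.1 + 1
      let pot_sum := if pot == '#' then st.2 + (counter + shifter) else st.2
      (counter, pot_sum)) (0, 0)).2

-- ===== PORT B =====
-- Source B: split on '#' (strings as char lists), loop over parts[:-1] accumulating
-- (prefix, total), then total + m*(m-1)//2 + m*(1+shifter)
def count_pots_alt (input_string : String) (shifter : Int) : Int :=
  let parts := PySem.Chars.splitOn input_string.toList ['#']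
  let m : Int := (parts.length : Int) - 1
  let pt := parts.dropLast.foldl   -- parts[:-1]
      (fun (st : Int × Int) part =>
        let pref := st.1 + (part.length : Int)
        (pref, st.2 + pref)) (0, 0)
  pt.2 + PySem.Int.floordiv (m * (m - 1)) 2 + m * (1 + shifter)

-- ===== PRECONDITION & SPEC =====
def Spec_count_pots (input_string : String) (shifter : Int) (out : Int) : Prop := out = count_pots_alt input_string shifter
instance (input_string : String) (shifter : Int) (out : Int) : Decidable (Spec_count_pots input_string shifter out) := by unfold Spec_count_pots; infer_instance

-- ===== CLAIM (what is proved, stated in full; the proofs are below) =====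
def Claim_equal_count_pots : Prop := ∀ (input_string : String) (shifter : Int), Dom_count_pots input_string shifter → Spec_count_pots input_string shifter (count_pots input_string shifter)

-- ===== LEMMAS AND PROOFS =====

-- 0-based positions (from start n) of the '#' characters of l
def hashPos (l : List Char) (n : Int) : List Int :=
  ((PySem.List.enumerate l n).filter (fun p => p.2 == '#')).map (·.1)

theorem hashPos_nil (n : Int) : hashPos [] n = [] := by
  simp [hashPos, PySem.List.enumerate_nil]

theorem hashPos_cons_hash (r : List Char) (n : Int) :
    hashPos ('#' :: r) n = n :: hashPos r (n + 1) := by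
  simp [hashPos, PySem.List.enumerate_cons]

theorem hashPos_cons_ne (c : Char) (r : List Char) (n : Int) (h : c ≠ '#') :
    hashPos (c :: r) n = hashPos r (n + 1) := by
  simp [hashPos, PySem.List.enumerate_cons, h]

-- A's fold from (c, s) adds the shifted positions of the '#' chars enumerated from c
theorem count_pots_fold_eq (sh : Int) (l : List Char) :
    ∀ (c s : Int),
      (l.foldl (fun (st : Int × Int) pot =>
          let counter := st.1 + 1
          let pot_sum := if pot == '#' then st.2 + (counter + sh) else st.2
          (counter, pot_sum)) (c, s)).2 =
      s + (hashPos l (c + 1)).sum + ((hashPos l (c + 1)).length : Int) * sh := by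
  induction l with
  | nil => intro c s; simp [hashPos_nil]
  | cons x xs ih =>
    intro c s
    rw [List.foldl_cons]
    by_cases hx : x = '#'
    · subst hx
      rw [hashPos_cons_hash]
      simp only [beq_self_eq_true, if_true, List.sum_cons, List.length_cons, ih]
      push_cast
      ring
    · have hne : (x == '#') = false := by simp [hx]
      rw [hashPos_cons_ne _ _ _ hx]
      simp only [hne, ih]
      simp

-- reference recursion for Python's split('#') on char lists: pre is the pending segment
def mysplit (pre : List Char) : List Char → List (List Char)
  | [] => [pre]
  | c :: r => if c = '#' then pre :: mysplit [] r else mysplit (pre ++ [c]) r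

theorem mysplit_ne_nil (l : List Char) : ∀ (pre : List Char), mysplit pre l ≠ [] := by
  induction l with
  | nil => intro pre; simp [mysplit]
  | cons c r ih =>
    intro pre
    simp only [mysplit]
    split
    · simp
    · exact ih (pre ++ [c])

theorem splitOn_go_eq' :
    ∀ (fuel : Nat) (l cur : List Char) (acc : List (List Char)), l.length < fuel →
      PySem.Chars.splitOn.go ['#'] fuel l cur acc = acc.reverse ++ mysplit cur.reverse l := by
  intro fuel
  induction fuel with
  | zero => intro l cur acc h; exact absurd h (by omega)
  | succ f ih =>
    intro l cur acc h
    cases l with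
    | nil => simp [PySem.Chars.splitOn.go, mysplit]
    | cons c r =>
      by_cases hc : c = '#'
      · subst hc
        rw [show PySem.Chars.splitOn.go ['#'] (f+1) ('#' :: r) cur acc
              = PySem.Chars.splitOn.go ['#'] f r [] (cur.reverse :: acc) from by
            simp [PySem.Chars.splitOn.go, List.isPrefixOf]]
        rw [ih r [] (cur.reverse :: acc) (by simpa using Nat.lt_of_succ_lt_succ h)]
        simp [mysplit]
      · rw [show PySem.Chars.splitOn.go ['#'] (f+1) (c :: r) cur acc
              = PySem.Chars.splitOn.go ['#'] f r (c :: cur) acc from by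
            simp only [PySem.Chars.splitOn.go, List.isPrefixOf]
            simp only [Bool.and_eq_true, beq_iff_eq]
            rw [if_neg (by simp [Ne.symm hc])]]
        rw [ih r (c :: cur) acc (by simpa using Nat.lt_of_succ_lt_succ h)]
        simp [mysplit, hc]

theorem splitOn_eq_mysplit (l : List Char) :
    PySem.Chars.splitOn l ['#'] = mysplit [] l := by
  have := splitOn_go_eq' (l.length + 1) l [] [] (by omega)
  simpa [PySem.Chars.splitOn] using this

-- triangle number as an Int
def tri (m : Nat) : Int := ((Finset.range m).sum (fun k => (k : Int)))

theorem tri_succ (m : Nat) : tri (m + 1) = tri m + m := by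
  simp [tri, Finset.sum_range_succ]

-- parts of mysplit have length (number of '#') + 1
theorem mysplit_length (l : List Char) :
    ∀ (pre : List Char) (n : Int), (mysplit pre l).length = (hashPos l n).length + 1 := by
  induction l with
  | nil => intro pre n; simp [mysplit, hashPos_nil]
  | cons c r ih =>
    intro pre n
    by_cases hc : c = '#'
    · subst hc; simp [mysplit, hashPos_cons_hash, ih [] (n + 1)]
    · simp [mysplit, hc, hashPos_cons_ne _ _ _ hc, ih (pre ++ [c]) (n + 1)]

-- B's loop over (mysplit pre l).dropLast from (p0, t0)
theorem b_loop_eq (l : List Char) :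
    ∀ (pre : List Char) (n p0 t0 : Int),
      (((mysplit pre l).dropLast).foldl
        (fun (st : Int × Int) part =>
          let pref := st.1 + (part.length : Int)
          (pref, st.2 + pref)) (p0, t0)).2
      = t0 + ((hashPos l n).length : Int) * (p0 + (pre.length : Int) - n)
          + (hashPos l n).sum - tri (hashPos l n).length := by
  induction l with
  | nil => intro pre n p0 t0; simp [mysplit, hashPos_nil, tri]
  | cons c r ih =>
    intro pre n p0 t0
    by_cases hc : c = '#'
    · subst hc
      rw [show mysplit pre ('#' :: r) = pre :: mysplit [] r from by simp [mysplit]]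
      rw [List.dropLast_cons_of_ne_nil (mysplit_ne_nil r []), List.foldl_cons]
      simp only
      rw [ih [] (n + 1) (p0 + pre.length) (t0 + (p0 + pre.length))]
      rw [hashPos_cons_hash]
      simp only [List.length_cons, List.sum_cons, tri_succ]
      push_cast [List.length_nil]
      ring
    · rw [show mysplit pre (c :: r) = mysplit (pre ++ [c]) r from by simp [mysplit, hc]]
      rw [ih (pre ++ [c]) (n + 1) p0 t0]
      rw [hashPos_cons_ne _ _ _ hc]
      simp only [List.length_append, List.length_cons, List.length_nil]
      push_cast
      ring

theorem tri_floordiv (m : Nat) :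
    PySem.Int.floordiv (((m : Int) + 1 - 1) * (((m : Int) + 1 - 1) - 1)) 2 = tri m := by
  have h2 : 2 * tri m = (m : Int) * ((m : Int) - 1) := by
    induction m with
    | zero => simp [tri]
    | succ k ih =>
      rw [tri_succ]; push_cast; push_cast at ih; ring_nf; ring_nf at ih; nlinarith [ih]
  have : ((m : Int) + 1 - 1) * (((m : Int) + 1 - 1) - 1) = 2 * tri m := by rw [h2]; ring
  rw [this, PySem.Int.floordiv, Int.mul_fdiv_cancel_left _ (by norm_num)]

-- ===== VERDICT (by name: the statement is the Claim_ definition above) =====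
theorem count_pots_spec : Claim_equal_count_pots := by
  intro input_string shifter _
  unfold Spec_count_pots count_pots count_pots_alt
  simp only [splitOn_eq_mysplit]
  rw [count_pots_fold_eq shifter input_string.toList 0 0]
  rw [b_loop_eq input_string.toList [] 1 0 0]
  rw [mysplit_length input_string.toList [] 1]
  push_cast [List.length_nil]
  rw [tri_floordiv]
  ring
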